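-- pv_equiv track=rewrite | github.com/EdwardZehuaZhang/3d-printing-monorepo | rhino8-internal-wire/actual pluggin folder/rh8/libs/UNNcBibN/wire_router/core.py | _approach_direction
-- ===== SOURCE A (Python) =====
-- from typing import Dict, FrozenSet, Iterable, Iterator, List, Optional, Sequence, Set, Tuple
--
-- GridIndex = Tuple[int, int, int]
--
-- def _approach_direction(
--     path: Sequence[GridIndex],
--     from_end: bool,
--     depth: int = 3,
-- ) -> Optional[GridIndex]:
--     """Return a unit-step direction vector describing how *path* approaches
--     the start (from_end=False) or end (from_end=True) of the path.
--
--     Averages up to *depth* step directions then quantises to the dominant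
--     axis.  Returns ``None`` if the path is too short.
--     """
--     if len(path) < 2:
--         return None
--
--     if from_end:
--         segment = list(reversed(path[-min(depth + 1, len(path)):]))
--     else:
--         segment = list(path[:min(depth + 1, len(path))])
--
--     dx, dy, dz = 0, 0, 0
--     for a, b in zip(segment[:-1], segment[1:]):
--         dx += b[0] - a[0]
--         dy += b[1] - a[1]
--         dz += b[2] - a[2]
--
--     # Quantise to the dominant axis (unit step).
--     adx, ady, adz = abs(dx), abs(dy), abs(dz)
--     dominant = max(adx, ady, adz)
--     if dominant == 0:
--         return None
--     if adx == dominant: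
--         return (1 if dx > 0 else -1, 0, 0)
--     if ady == dominant:
--         return (0, 1 if dy > 0 else -1, 0)
--     return (0, 0, 1 if dz > 0 else -1)
-- ===== SOURCE B (Python) =====
-- def _approach_direction(path, from_end, depth=3):
--     """Dominant-axis direction of how *path* approaches its start or end.
--
--     Inspects the segment of up to *depth* steps at the chosen end; since
--     step deltas telescope, only the segment's two endpoints are read.
--     """
--     if len(path) < 2:
--         return None
--     k = min(depth + 1, len(path))
--     if from_end:
--         first, last = path[-1], path[-k]
--     else:
--         first, last = path[0], path[k - 1]
--     dx, dy, dz = last[0] - first[0], last[1] - first[1], last[2] - first[2]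
--     adx, ady, adz = abs(dx), abs(dy), abs(dz)
--     dominant = max(adx, ady, adz)
--     if dominant == 0:
--         return None
--     if adx == dominant:
--         return (1 if dx > 0 else -1, 0, 0)
--     if ady == dominant:
--         return (0, 1 if dy > 0 else -1, 0)
--     return (0, 0, 1 if dz > 0 else -1)
-- ===== Notes on version B (the rewrite author's own statement) =====
-- stated objective: simpler
-- what changed: B replaces A's slice-construction plus zip/accumulate loop over step deltas by the closed-form endpoint difference of the inspected segment (the deltas telescope), reading just two elements by index; Pre_ excludes negative depth, which is outside the function's natural domain and where A's value is an accident of Python slice semantics.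
-- outside the precondition, e.g. on _approach_direction([(0, 0, 0), (1, 1, 0), (2, 2, 0)], False, -1): A returns None, B returns (1, 0, 0); on _approach_direction([(0, 0, 0), (1, 0, 0)], True, -4): A returns None, B raises IndexError
import Mathlib
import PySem

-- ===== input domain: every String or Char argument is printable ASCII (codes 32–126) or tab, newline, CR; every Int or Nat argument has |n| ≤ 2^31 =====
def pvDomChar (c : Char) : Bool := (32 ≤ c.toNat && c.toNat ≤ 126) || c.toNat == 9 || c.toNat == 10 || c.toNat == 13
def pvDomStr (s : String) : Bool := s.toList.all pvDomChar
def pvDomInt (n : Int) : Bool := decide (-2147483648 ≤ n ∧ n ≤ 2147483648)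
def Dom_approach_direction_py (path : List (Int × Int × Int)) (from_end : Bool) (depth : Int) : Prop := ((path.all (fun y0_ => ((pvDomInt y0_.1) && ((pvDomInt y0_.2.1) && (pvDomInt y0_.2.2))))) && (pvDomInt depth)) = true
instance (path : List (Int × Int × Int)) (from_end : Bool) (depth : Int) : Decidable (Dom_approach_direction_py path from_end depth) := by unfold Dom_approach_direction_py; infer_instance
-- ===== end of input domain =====

-- B computes the endpoint difference of the inspected segment directly (the
-- step deltas telescope), replacing A's slice/zip/accumulation loop; objective:
-- simpler (no loop, no intermediate segment list).

-- ===== PORT A =====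
-- the loop body: dx += b[0]-a[0]; dy += b[1]-a[1]; dz += b[2]-a[2]
def pvStep (acc : Int × Int × Int) (p : (Int × Int × Int) × (Int × Int × Int)) : Int × Int × Int :=
  (acc.1 + (p.2.1 - p.1.1), acc.2.1 + (p.2.2.1 - p.1.2.1), acc.2.2 + (p.2.2.2 - p.1.2.2))

def approach_direction_py (path : List (Int × Int × Int)) (from_end : Bool) (depth : Int) : Option (Int × Int × Int) :=
  if (path.length : Int) < 2 then none
  else
    let segment : List (Int × Int × Int) :=
      if from_end then
        (PySem.List.slice path (some (-(min (depth + 1) (path.length : Int)))) none).reverse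
      else
        PySem.List.slice path none (some (min (depth + 1) (path.length : Int)))
    -- for a, b in zip(segment[:-1], segment[1:]): …
    let d :=
      ((PySem.List.slice segment none (some (-1))).zip
        (PySem.List.slice segment (some 1) none)).foldl pvStep (0, 0, 0)
    let adx := |d.1|
    let ady := |d.2.1|
    let adz := |d.2.2|
    let dominant := max adx (max ady adz)
    if dominant = 0 then none
    else if adx = dominant then some ((if d.1 > 0 then 1 else -1), 0, 0)
    else if ady = dominant then some (0, (if d.2.1 > 0 then 1 else -1), 0)
    else some (0, 0, (if d.2.2 > 0 then 1 else -1))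

-- ===== PORT B =====
def pvQuantise (dx dy dz : Int) : Option (Int × Int × Int) :=
  let adx := |dx|
  let ady := |dy|
  let adz := |dz|
  let dominant := max adx (max ady adz)
  if dominant = 0 then none
  else if adx = dominant then some ((if dx > 0 then 1 else -1), 0, 0)
  else if ady = dominant then some (0, (if dy > 0 then 1 else -1), 0)
  else some (0, 0, (if dz > 0 then 1 else -1))

def approach_direction_py_alt (path : List (Int × Int × Int)) (from_end : Bool) (depth : Int) : Option (Int × Int × Int) :=
  if (path.length : Int) < 2 then none
  else
    let k := min (depth + 1) (path.length : Int)
    let fl := if from_end then (PySem.List.pyGet? path (-1), PySem.List.pyGet? path (-k))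
              else (PySem.List.pyGet? path 0, PySem.List.pyGet? path (k - 1))
    match fl.1, fl.2 with
    | some f, some l => pvQuantise (l.1 - f.1) (l.2.1 - f.2.1) (l.2.2 - f.2.2)
    | _, _ => none  -- totalisation only: inside Pre_ both indices are in range

-- ===== PRECONDITION & SPEC =====
-- Pre_ excludes negative depth: outside the function's natural domain (a step
-- count), A's value there is an accident of Python slice semantics and B may
-- even raise IndexError.
def Pre_approach_direction_py (path : List (Int × Int × Int)) (from_end : Bool) (depth : Int) : Prop := 0 ≤ depth
instance (path : List (Int × Int × Int)) (from_end : Bool) (depth : Int) : Decidable (Pre_approach_direction_py path from_end depth) := by unfold Pre_approach_direction_py; infer_instance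

def pvWitness_approach_direction_py : (List (Int × Int × Int)) × Bool × Int := ([(0, 0, 0), (1, 0, 0)], false, 3)

def Spec_approach_direction_py (path : List (Int × Int × Int)) (from_end : Bool) (depth : Int) (out : Option (Int × Int × Int)) : Prop := out = approach_direction_py_alt path from_end depth
instance (path : List (Int × Int × Int)) (from_end : Bool) (depth : Int) (out : Option (Int × Int × Int)) : Decidable (Spec_approach_direction_py path from_end depth out) := by unfold Spec_approach_direction_py; infer_instance

-- ===== CLAIM (what is proved, stated in full; the proofs are below) =====
def Claim_equal_approach_direction_py : Prop := ∀ (path : List (Int × Int × Int)) (from_end : Bool) (depth : Int), Dom_approach_direction_py path from_end depth → Pre_approach_direction_py path from_end depth → Spec_approach_direction_py path from_end depth (approach_direction_py path from_end depth)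

-- ===== LEMMAS AND PROOFS =====

-- the zipped fold over consecutive pairs telescopes
theorem pv_tel (t : List (Int × Int × Int)) : ∀ (a : Int × Int × Int) (acc : Int × Int × Int),
    ((a :: t).dropLast.zip t).foldl pvStep acc
      = (acc.1 + (((a :: t).getLastD (0,0,0)).1 - a.1),
         acc.2.1 + (((a :: t).getLastD (0,0,0)).2.1 - a.2.1),
         acc.2.2 + (((a :: t).getLastD (0,0,0)).2.2 - a.2.2)) := by
  induction t with
  | nil => intro a acc; simp
  | cons b t ih =>
    intro a acc
    have h1 : (a :: b :: t).dropLast.zip (b :: t)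
        = (a, b) :: ((b :: t).dropLast.zip t) := by
      simp [List.dropLast, List.zip]
    rw [h1, List.foldl_cons, ih b]
    simp [pvStep]
    constructor
    · ring
    constructor <;> ring

-- A's accumulated (dx,dy,dz) over any segment = last − first (0 if too short)
theorem pv_delta (l : List (Int × Int × Int)) :
    ((PySem.List.slice l none (some (-1))).zip
      (PySem.List.slice l (some 1) none)).foldl pvStep (0, 0, 0)
      = ((l.getLastD (0,0,0)).1 - (l.headD (0,0,0)).1,
         (l.getLastD (0,0,0)).2.1 - (l.headD (0,0,0)).2.1,
         (l.getLastD (0,0,0)).2.2 - (l.headD (0,0,0)).2.2) := by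
  rw [PySem.List.slice_to_neg_one, PySem.List.slice_from_one]
  cases l with
  | nil => simp
  | cons a t => rw [show (a :: t).tail = t from rfl, pv_tel t a (0,0,0)]; simp

-- A's segment (the slice inspected by the loop), for stating A's value compactly
def pvSeg (path : List (Int × Int × Int)) (fe : Bool) (depth : Int) : List (Int × Int × Int) :=
  if fe then (PySem.List.slice path (some (-(min (depth + 1) (path.length : Int)))) none).reverse
  else PySem.List.slice path none (some (min (depth + 1) (path.length : Int)))

theorem pv_A_eq (path : List (Int × Int × Int)) (fe : Bool) (depth : Int)
    (h2 : ¬ (path.length : Int) < 2) :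
    approach_direction_py path fe depth =
      pvQuantise
        (((pvSeg path fe depth).getLastD (0,0,0)).1 - ((pvSeg path fe depth).headD (0,0,0)).1)
        (((pvSeg path fe depth).getLastD (0,0,0)).2.1 - ((pvSeg path fe depth).headD (0,0,0)).2.1)
        (((pvSeg path fe depth).getLastD (0,0,0)).2.2 - ((pvSeg path fe depth).headD (0,0,0)).2.2) := by
  simp only [approach_direction_py, pvSeg, if_neg h2, pv_delta, pvQuantise]
  rfl

theorem pv_take_getLast? (l : List (Int × Int × Int)) (K : Nat) (h1 : 1 ≤ K) (h2 : K ≤ l.length) :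
    (l.take K).getLast? = l[K-1]? := by
  rw [List.getLast?_eq_getElem?]
  simp [List.getElem?_take]
  rw [if_pos (by omega)]
  congr 1; omega

theorem pv_drop_getLast? (l : List (Int × Int × Int)) (j : Nat) (h : j < l.length) :
    (l.drop j).getLast? = l[l.length-1]? := by
  rw [List.getLast?_eq_getElem?]
  simp [List.getElem?_drop]
  congr 1; omega

-- ===== VERDICT (by name: the statement is the Claim_ definition above) =====
theorem approach_direction_py_spec : Claim_equal_approach_direction_py := by
  intro path fe depth _ hpre
  unfold Pre_approach_direction_py at hpre
  unfold Spec_approach_direction_py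
  by_cases h2 : (path.length : Int) < 2
  · simp [approach_direction_py, approach_direction_py_alt, h2]
  · rw [pv_A_eq path fe depth h2]
    simp only [approach_direction_py_alt, if_neg h2]
    set k : Int := min (depth + 1) (path.length : Int) with hkdef
    have hk1 : 1 ≤ k := by
      rw [hkdef]; omega
    have hkn : k ≤ (path.length : Int) := min_le_right _ _
    set K : Nat := k.toNat with hK
    have hKk : (K : Int) = k := by omega
    have hK1 : 1 ≤ K := by omega
    have hKn : K ≤ path.length := by omega
    cases fe
    · -- from_end = false
      simp only [Bool.false_eq_true, if_false]
      have hseg : pvSeg path false depth = path.take K := by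
        simp only [pvSeg, Bool.false_eq_true, if_false, ← hkdef]
        rw [PySem.List.slice_to _ (by omega : (0:Int) ≤ k)]
      have hf : PySem.List.pyGet? path 0 = path[0]? := by
        simp only [PySem.List.pyGet?, PySem.List.pyIdx?]
        rw [if_pos (by omega : 0 < (path.length : Int))]
        simp
      have hl : PySem.List.pyGet? path (k - 1) = path[K-1]? := by
        rw [show k - 1 = ((K-1 : Nat) : Int) by omega]
        simp
      have hfv : path[0]? = some (path[0]'(by omega)) := List.getElem?_eq_getElem (by omega)
      have hlv : path[K-1]? = some (path[K-1]'(by omega)) := List.getElem?_eq_getElem (by omega)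
      rw [hf, hl, hfv, hlv]
      have hhead : (path.take K).headD (0,0,0) = path[0]'(by omega) := by
        have h' : (path.take K).head? = path[0]? := by
          rw [List.head?_take, if_neg (by omega : ¬ K = 0), List.head?_eq_getElem?]
        rw [List.headD_eq_head?_getD, h', hfv]; rfl
      have hlast : (path.take K).getLastD (0,0,0) = path[K-1]'(by omega) := by
        rw [List.getLastD_eq_getLast?, pv_take_getLast? path K hK1 hKn, hlv]; rfl
      rw [hseg, hhead, hlast]
    · -- from_end = true
      simp only [if_true]
      have hseg : pvSeg path true depth = (path.drop (path.length - K)).reverse := by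
        simp only [pvSeg, if_true, ← hkdef]
        rw [show -k = -((K : Nat) : Int) by omega,
          PySem.List.slice_from_neg_natCast _ _ (by omega)]
      have hf : PySem.List.pyGet? path (-1) = path.getLast? := PySem.List.pyGet?_neg_one path
      have hl : PySem.List.pyGet? path (-k) = path[path.length - K]? := by
        rw [show -k = -((K : Nat) : Int) by omega]
        rw [PySem.List.pyGet?_neg_natCast _ _ (by omega) (by exact_mod_cast hKn)]
      have hfv : path.getLast? = some (path[path.length - 1]'(by omega)) := by
        rw [List.getLast?_eq_getElem?, List.getElem?_eq_getElem (by omega)]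
      have hlv : path[path.length - K]? = some (path[path.length - K]'(by omega)) :=
        List.getElem?_eq_getElem (by omega)
      rw [hf, hl, hfv, hlv]
      have hhead : ((path.drop (path.length - K)).reverse).headD (0,0,0)
          = path[path.length - 1]'(by omega) := by
        rw [List.headD_eq_head?_getD, List.head?_reverse,
          pv_drop_getLast? path _ (by omega), List.getElem?_eq_getElem (by omega)]; rfl
      have hlast : ((path.drop (path.length - K)).reverse).getLastD (0,0,0)
          = path[path.length - K]'(by omega) := by
        rw [List.getLastD_eq_getLast?, List.getLast?_reverse, List.head?_drop, hlv]; rfl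
      rw [hseg, hhead, hlast]
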